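-- pv_equiv track=rewrite | github.com/M1ZoN/CodeSignal | src/longestUncorruptedSegment.py | longestUncorruptedSegment
-- ===== SOURCE A (Python) =====
-- def longestUncorruptedSegment(sourceArray, destinationArray):
--     ind = 0
--     longest = 0
--     ongoing = 0
--     res = []
--     for i in range(len(sourceArray)):
--         if sourceArray[i] == destinationArray[i]:
--             ongoing += 1
--         else:
--             if ongoing > longest:
--                 longest = ongoing
--                 ind = i - longest
--             ongoing = 0
--     if ongoing > longest:
--         longest = ongoing
--         ind = len(sourceArray) - longest
--     res.append(longest)
--     res.append(ind)
--     return res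
-- ===== SOURCE B (Python) =====
-- def longestUncorruptedSegment(sourceArray, destinationArray):
--     matches = [sourceArray[i] == destinationArray[i] for i in range(len(sourceArray))]
--     best, best_start = 0, 0
--     i, n = 0, len(matches)
--     while i < n:
--         if matches[i]:
--             j = i
--             while j < n and matches[j]:
--                 j += 1
--             if j - i > best:
--                 best, best_start = j - i, i
--             i = j
--         else:
--             i += 1
--     return [best, best_start]
-- ===== Notes on version B (the rewrite author's own statement) =====
-- stated objective: alternative
-- what changed: B precomputes a boolean match list and scans it run by run (inner loop skips over each whole run of equal elements, comparing the run length against the best), instead of A's single counter with an else-branch/after-loop fixup.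
import Mathlib
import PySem

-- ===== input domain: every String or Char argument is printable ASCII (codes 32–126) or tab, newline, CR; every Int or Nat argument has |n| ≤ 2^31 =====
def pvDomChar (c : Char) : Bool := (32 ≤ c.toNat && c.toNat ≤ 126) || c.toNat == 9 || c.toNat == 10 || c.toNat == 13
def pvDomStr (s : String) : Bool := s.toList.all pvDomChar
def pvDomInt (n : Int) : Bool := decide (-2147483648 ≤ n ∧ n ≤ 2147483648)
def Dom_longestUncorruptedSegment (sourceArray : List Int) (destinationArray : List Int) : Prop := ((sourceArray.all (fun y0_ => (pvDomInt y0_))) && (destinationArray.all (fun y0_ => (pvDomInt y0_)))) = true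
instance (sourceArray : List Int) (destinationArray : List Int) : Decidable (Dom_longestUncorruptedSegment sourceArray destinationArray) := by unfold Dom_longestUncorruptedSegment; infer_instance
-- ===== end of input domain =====

-- B scans a precomputed boolean match list run by run instead of A's running counter with end fixup; equal return values, same cost (objective: alternative).

-- ===== PORT A =====
-- A: one pass i = 0..n-1 with a running counter `ongoing`, best updated in the
-- else-branch and once more after the loop.  (s[i], d[i] raise when d is shorter:
-- excluded by Pre_; pyGetD's default 0 is never used inside Pre_.)
def longestUncorruptedSegment (sourceArray : List Int) (destinationArray : List Int) : List Int :=
  let n : Int := sourceArray.length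
  let st := (PySem.List.pyRange 0 n 1).foldl
    (fun (st : Int × Int × Int) i =>
      if PySem.List.pyGetD sourceArray i 0 = PySem.List.pyGetD destinationArray i 0 then
        (st.1, st.2.1, st.2.2 + 1)
      else if st.2.2 > st.2.1 then (i - st.2.2, st.2.2, 0)
      else (st.1, st.2.1, 0)) (0, 0, 0)
  if st.2.2 > st.2.1 then [st.2.2, n - st.2.2] else [st.2.1, st.1]

-- ===== PORT B =====
-- matches = [sourceArray[i] == destinationArray[i] for i in range(len(sourceArray))]
def pvMatches (sourceArray : List Int) (destinationArray : List Int) : List Bool :=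
  (PySem.List.pyRange 0 (sourceArray.length : Int) 1).map
    (fun i => decide (PySem.List.pyGetD sourceArray i 0 = PySem.List.pyGetD destinationArray i 0))

-- the inner `while j < n and matches[j]: j += 1` : length of the leading run of True
def pvRunLen : List Bool → Nat
  | true :: rest => pvRunLen rest + 1
  | _ => 0

-- the outer while loop of Source B: (remaining matches, pos, best, best_start)
def pvScanRuns : List Bool → Int → Int → Int → Int × Int
  | [], _, best, bstart => (best, bstart)
  | false :: rest, pos, best, bstart => pvScanRuns rest (pos + 1) best bstart
  | true :: rest, pos, best, bstart =>
      let r := pvRunLen (true :: rest)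
      if (r : Int) > best then pvScanRuns ((true :: rest).drop r) (pos + r) r pos
      else pvScanRuns ((true :: rest).drop r) (pos + r) best bstart
termination_by l => l.length
decreasing_by
  all_goals simp [pvRunLen]

def longestUncorruptedSegment_alt (sourceArray : List Int) (destinationArray : List Int) : List Int :=
  let p := pvScanRuns (pvMatches sourceArray destinationArray) 0 0 0
  [p.1, p.2]

-- ===== PRECONDITION & SPEC =====
-- Pre_ excludes exactly the inputs where Python A raises IndexError
-- (destinationArray shorter than sourceArray); Python B raises there too.
def Pre_longestUncorruptedSegment (sourceArray : List Int) (destinationArray : List Int) : Prop :=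
  sourceArray.length ≤ destinationArray.length
instance (sourceArray : List Int) (destinationArray : List Int) : Decidable (Pre_longestUncorruptedSegment sourceArray destinationArray) := by unfold Pre_longestUncorruptedSegment; infer_instance
def pvWitness_longestUncorruptedSegment : List Int × List Int := ([1, 2, 3], [1, 5, 3])

def Spec_longestUncorruptedSegment (sourceArray : List Int) (destinationArray : List Int) (out : List Int) : Prop := out = longestUncorruptedSegment_alt sourceArray destinationArray
instance (sourceArray : List Int) (destinationArray : List Int) (out : List Int) : Decidable (Spec_longestUncorruptedSegment sourceArray destinationArray out) := by unfold Spec_longestUncorruptedSegment; infer_instance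

-- ===== CLAIM (what is proved, stated in full; the proofs are below) =====
def Claim_equal_longestUncorruptedSegment : Prop := ∀ (sourceArray : List Int) (destinationArray : List Int), Dom_longestUncorruptedSegment sourceArray destinationArray → Pre_longestUncorruptedSegment sourceArray destinationArray → Spec_longestUncorruptedSegment sourceArray destinationArray (longestUncorruptedSegment sourceArray destinationArray)

-- ===== LEMMAS AND PROOFS =====

-- A's loop, re-expressed as a recursion over the boolean match list with an index.
def pvAFold : List Bool → Int → (Int × Int × Int) → (Int × Int × Int)
  | [], _, st => st
  | b :: bs, i, st =>
      if b then pvAFold bs (i + 1) (st.1, st.2.1, st.2.2 + 1)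
      else if st.2.2 > st.2.1 then pvAFold bs (i + 1) (i - st.2.2, st.2.2, 0)
      else pvAFold bs (i + 1) (st.1, st.2.1, 0)

-- A's after-loop fixup.
def pvFinish (st : Int × Int × Int) (pos : Int) : Int × Int :=
  if st.2.2 > st.2.1 then (st.2.2, pos - st.2.2) else (st.2.1, st.1)

lemma pvAFold_bridge (s d : List Int) (k : Nat) : ∀ (a : Int) (st : Int × Int × Int),
    (((s.length : Int)) - a).toNat = k →
    (PySem.List.pyRange a (s.length : Int) 1).foldl
      (fun (st : Int × Int × Int) i =>
        if PySem.List.pyGetD s i 0 = PySem.List.pyGetD d i 0 then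
          (st.1, st.2.1, st.2.2 + 1)
        else if st.2.2 > st.2.1 then (i - st.2.2, st.2.2, 0)
        else (st.1, st.2.1, 0)) st
    = pvAFold ((PySem.List.pyRange a (s.length : Int) 1).map
        (fun i => decide (PySem.List.pyGetD s i 0 = PySem.List.pyGetD d i 0))) a st := by
  induction k with
  | zero =>
    intro a st h
    rw [PySem.List.pyRange_one_eq_nil (by omega)]
    simp [pvAFold]
  | succ k ih =>
    intro a st h
    by_cases hab : a < (s.length : Int)
    · rw [PySem.List.pyRange_one_cons hab]
      simp only [List.foldl_cons, List.map_cons]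
      by_cases hc : PySem.List.pyGetD s a 0 = PySem.List.pyGetD d a 0
      · simp only [hc, if_true, decide_true, pvAFold, if_true]
        exact ih (a + 1) _ (by omega)
      · simp only [hc, if_false, decide_false, pvAFold, Bool.false_eq_true]
        by_cases hg : st.2.2 > st.2.1
        · simp only [hg, if_true]
          exact ih (a + 1) _ (by omega)
        · simp only [hg, if_false]
          exact ih (a + 1) _ (by omega)
    · rw [PySem.List.pyRange_one_eq_nil (by omega)]
      simp [pvAFold]

lemma pvRunLen_decomp : ∀ bs : List Bool,
    bs = List.replicate (pvRunLen bs) true ++ bs.drop (pvRunLen bs) := by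
  intro bs
  induction bs with
  | nil => simp [pvRunLen]
  | cons b rest ih =>
    cases b with
    | false => simp [pvRunLen]
    | true =>
      simp only [pvRunLen, List.replicate_succ, List.drop_succ_cons, List.cons_append]
      exact congrArg (true :: ·) ih

lemma pvRunLen_drop : ∀ bs : List Bool,
    bs.drop (pvRunLen bs) = [] ∨ ∃ rest', bs.drop (pvRunLen bs) = false :: rest' := by
  intro bs
  induction bs with
  | nil => simp [pvRunLen]
  | cons b rest ih =>
    cases b with
    | false => right; exact ⟨rest, by simp [pvRunLen]⟩
    | true => simpa [pvRunLen] using ih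

lemma pvAFold_run : ∀ (m : Nat) (rest : List Bool) (i ind lg og : Int),
    pvAFold (List.replicate m true ++ rest) i (ind, lg, og)
    = pvAFold rest (i + m) (ind, lg, og + m) := by
  intro m
  induction m with
  | zero => intro rest i ind lg og; simp
  | succ m ih =>
    intro rest i ind lg og
    simp only [List.replicate_succ, List.cons_append, pvAFold, if_true]
    rw [ih]
    push_cast
    ring_nf

lemma pvMain : ∀ (k : Nat) (bs : List Bool) (i lg ind : Int), bs.length ≤ k → 0 ≤ lg →
    pvFinish (pvAFold bs i (ind, lg, 0)) (i + bs.length) = pvScanRuns bs i lg ind := by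
  intro k
  induction k with
  | zero =>
    intro bs i lg ind hk hlg
    have : bs = [] := List.eq_nil_of_length_eq_zero (by omega)
    subst this
    simp [pvAFold, pvFinish, pvScanRuns, not_lt.mpr hlg]
  | succ k ih =>
    intro bs i lg ind hk hlg
    match bs with
    | [] => simp [pvAFold, pvFinish, pvScanRuns, not_lt.mpr hlg]
    | false :: rest =>
      rw [pvScanRuns]
      simp only [pvAFold, Bool.false_eq_true, if_false, if_neg (not_lt.mpr hlg)]
      have hpos : i + (((false :: rest).length : Nat) : Int) = (i + 1) + (rest.length : Int) := by
        simp; ring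
      rw [hpos]
      exact ih rest (i + 1) lg ind (by simp at hk ⊢; omega) hlg
    | true :: rest =>
      have hdecomp := pvRunLen_decomp (true :: rest)
      have hrun : pvAFold (true :: rest) i (ind, lg, 0)
          = pvAFold ((true :: rest).drop (pvRunLen (true :: rest)))
              (i + (pvRunLen (true :: rest) : Int)) (ind, lg, (pvRunLen (true :: rest) : Int)) := by
        conv_lhs => rw [hdecomp]
        rw [pvAFold_run]
        norm_num
      have hlen : (true :: rest).length
          = pvRunLen (true :: rest) + ((true :: rest).drop (pvRunLen (true :: rest))).length := by
        conv_lhs => rw [hdecomp]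
        simp
      rw [pvScanRuns, hrun]
      rcases pvRunLen_drop (true :: rest) with hnil | ⟨rest'', hfc⟩
      · rw [hnil] at hrun hlen ⊢
        have hlen0 : ((true :: rest).length : Int) = (pvRunLen (true :: rest) : Int) := by
          rw [hlen]; simp
        simp only [pvAFold, pvFinish, pvScanRuns, hlen0]
        by_cases hg : ((pvRunLen (true :: rest) : Nat) : Int) > lg
        · simp only [if_pos hg]
          simp
        · simp only [if_neg hg]
      · rw [hfc] at hrun hlen ⊢
        have hlenr : rest''.length ≤ k := by
          simp only [List.length_cons] at hlen hk
          omega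
        have hpos : i + (((true :: rest).length : Nat) : Int)
            = (i + (pvRunLen (true :: rest) : Int) + 1) + (rest''.length : Int) := by
          rw [hlen]; simp only [List.length_cons]; push_cast; ring
        rw [hpos]
        by_cases hg : ((pvRunLen (true :: rest) : Nat) : Int) > lg
        · simp only [pvAFold, Bool.false_eq_true, if_false, if_pos hg, add_sub_cancel_right]
          rw [pvScanRuns]
          exact ih rest'' (i + (pvRunLen (true :: rest) : Int) + 1) (pvRunLen (true :: rest) : Int) i
            hlenr (by positivity)
        · simp only [pvAFold, Bool.false_eq_true, if_false, if_neg hg]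
          rw [pvScanRuns]
          exact ih rest'' (i + (pvRunLen (true :: rest) : Int) + 1) lg ind hlenr hlg

-- ===== VERDICT (by name: the statement is the Claim_ definition above) =====
theorem longestUncorruptedSegment_spec : Claim_equal_longestUncorruptedSegment := by
  intro s d _ _
  unfold Spec_longestUncorruptedSegment longestUncorruptedSegment longestUncorruptedSegment_alt
  simp only []
  rw [pvAFold_bridge s d ((s.length : Int) - 0).toNat 0 (0, 0, 0) rfl]
  have hms : (PySem.List.pyRange 0 (s.length : Int) 1).map
      (fun i => decide (PySem.List.pyGetD s i 0 = PySem.List.pyGetD d i 0))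
      = pvMatches s d := rfl
  rw [hms]
  have hlen : ((pvMatches s d).length : Int) = (s.length : Int) := by
    unfold pvMatches
    simp [PySem.List.length_pyRange_one]
  have := pvMain (pvMatches s d).length (pvMatches s d) 0 0 0 le_rfl le_rfl
  rw [zero_add, hlen] at this
  set st := pvAFold (pvMatches s d) 0 (0, 0, 0)
  rw [← this]
  unfold pvFinish
  by_cases hg : st.2.2 > st.2.1
  · simp [hg]
  · simp [hg]
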